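-- pv_equiv track=rewrite | github.com/SebasCampoPaz/MiRepo | tarea1.py | sumaValoresMatriz
-- ===== SOURCE A (Python) =====
-- def sumaValoresMatriz(mat, par):
--     sumaValores = 0
--     i = 0
--     while i < len(par):
--         if par[i][0] in mat:
--             j = 0
--             bandera = 0
--             while j < len(mat[par[i][0]]) and bandera == 0:
--                 if mat[par[i][0]][j][0] == par[i][1]:
--                     sumaValores += mat[par[i][0]][j][1]
--                     bandera = 1
--                 j += 1
--         i += 1
--     return sumaValores
-- ===== SOURCE B (Python) =====
-- def sumaValoresMatriz(mat, par):
--     # Preindex each value list into a dict keeping the first occurrence of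
--     # every inner key, then answer each query pair by two dict lookups.
--     idx = {}
--     for k, lst in mat.items():
--         d = {}
--         for a, b in lst:
--             if a not in d:
--                 d[a] = b
--         idx[k] = d
--     total = 0
--     for a, b in par:
--         d = idx.get(a)
--         if d is not None:
--             total += d.get(b, 0)
--     return total
-- ===== Notes on version B (the rewrite author's own statement) =====
-- stated objective: alternative
-- what changed: Instead of rescanning the matching value list for every query pair, B preindexes mat once into a nested dict of first occurrences and answers each pair by two dict lookups; it trades the per-pair scan for an upfront indexing pass.
import Mathlib
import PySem

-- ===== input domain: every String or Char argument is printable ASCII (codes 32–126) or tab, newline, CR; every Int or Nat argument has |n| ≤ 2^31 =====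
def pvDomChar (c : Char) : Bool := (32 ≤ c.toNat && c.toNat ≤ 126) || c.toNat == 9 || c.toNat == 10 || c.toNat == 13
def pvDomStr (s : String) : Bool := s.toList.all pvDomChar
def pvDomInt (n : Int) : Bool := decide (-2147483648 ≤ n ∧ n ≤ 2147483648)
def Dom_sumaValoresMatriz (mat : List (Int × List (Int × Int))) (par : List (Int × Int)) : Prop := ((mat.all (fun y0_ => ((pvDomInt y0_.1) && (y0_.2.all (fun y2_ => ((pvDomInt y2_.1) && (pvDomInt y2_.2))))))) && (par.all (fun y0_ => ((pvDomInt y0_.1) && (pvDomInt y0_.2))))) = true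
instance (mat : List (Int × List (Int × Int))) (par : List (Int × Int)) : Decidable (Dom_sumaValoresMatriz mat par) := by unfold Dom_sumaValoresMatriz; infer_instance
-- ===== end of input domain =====

-- B preindexes mat once into a nested first-occurrence dict so each query pair is two lookups
-- instead of a scan of the value list (return-value equivalence; neither program mutates its arguments).


-- ===== PORT A =====
-- inner while loop: scan mat[par[i][0]] left to right, add the value of the first pair
-- whose key equals par[i][1] (bandera stops the loop after the first hit)
def innerScanA (lst : List (Int × Int)) (target : Int) : Int :=
  match lst with
  | [] => 0
  | (a, b) :: rest => if a == target then b else innerScanA rest target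

-- outer while loop over par; 'par[i][0] in mat' / 'mat[par[i][0]]' = first-match lookup in the dict
def outerLoopA (mat : List (Int × List (Int × Int))) (par : List (Int × Int)) (sumaValores : Int) : Int :=
  match par with
  | [] => sumaValores
  | p :: rest =>
      match mat.find? (fun kv => kv.1 == p.1) with
      | none => outerLoopA mat rest sumaValores
      | some kv => outerLoopA mat rest (sumaValores + innerScanA kv.2 p.2)

def sumaValoresMatriz (mat : List (Int × List (Int × Int))) (par : List (Int × Int)) : Int :=
  outerLoopA mat par 0

-- ===== PORT B =====
-- d = {}; for a, b in lst: if a not in d: d[a] = b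
def buildInnerB (lst : List (Int × Int)) : PySem.Dict Int Int :=
  lst.foldl (fun d p => if d.contains p.1 then d else d.insert p.1 p.2) PySem.Dict.empty

-- idx = {}; for k, lst in mat.items(): idx[k] = {…}  (a dict's keys are unique, so the
-- first-occurrence insert is exact for the assoc-list rendering of mat)
def buildIdxB (mat : List (Int × List (Int × Int))) : PySem.Dict Int (PySem.Dict Int Int) :=
  mat.foldl (fun ix kv => if ix.contains kv.1 then ix else ix.insert kv.1 (buildInnerB kv.2)) PySem.Dict.empty

def sumaValoresMatriz_alt (mat : List (Int × List (Int × Int))) (par : List (Int × Int)) : Int :=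
  let idx := buildIdxB mat
  par.foldl (fun total p =>
    match idx.get? p.1 with
    | none => total
    | some d => total + d.getD p.2 0) 0

-- ===== PRECONDITION & SPEC =====
def Spec_sumaValoresMatriz (mat : List (Int × List (Int × Int))) (par : List (Int × Int)) (out : Int) : Prop := out = sumaValoresMatriz_alt mat par
instance (mat : List (Int × List (Int × Int))) (par : List (Int × Int)) (out : Int) : Decidable (Spec_sumaValoresMatriz mat par out) := by unfold Spec_sumaValoresMatriz; infer_instance

-- ===== CLAIM (what is proved, stated in full; the proofs are below) =====
def Claim_equal_sumaValoresMatriz : Prop := ∀ (mat : List (Int × List (Int × Int))) (par : List (Int × Int)), Dom_sumaValoresMatriz mat par → Spec_sumaValoresMatriz mat par (sumaValoresMatriz mat par)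

-- ===== LEMMAS AND PROOFS =====

-- B's first-occurrence inner dict answers exactly A's first-match scan
theorem buildInnerB_getD (lst : List (Int × Int)) (t : Int) (d : PySem.Dict Int Int) :
    (lst.foldl (fun d p => if d.contains p.1 then d else d.insert p.1 p.2) d).getD t 0
      = if d.contains t then d.getD t 0 else innerScanA lst t := by
  induction lst generalizing d with
  | nil =>
    simp only [List.foldl_nil, innerScanA]
    by_cases hd : d.contains t
    · rw [if_pos hd]
    · rw [if_neg hd, PySem.Dict.getD_of_not_contains d (0 : Int) (by simp [hd])]
  | cons p rest ih =>
    simp only [List.foldl_cons, innerScanA]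
    by_cases hc : d.contains p.1
    · simp only [hc, if_true, ih]
      by_cases ht : d.contains t
      · simp [ht]
      · have : ¬ (p.1 == t) := by
          intro h
          exact absurd (beq_iff_eq.mp h ▸ hc) (by simp [ht])
        simp [ht, this]
    · simp only [hc, if_false, ih]
      by_cases ht : t = p.1
      · subst ht
        simp [PySem.Dict.contains_insert, PySem.Dict.getD_insert, hc]
      · have hb : (t == p.1) = false := beq_eq_false_iff_ne.mpr ht
        have hb' : (p.1 == t) = false := beq_eq_false_iff_ne.mpr (fun h => ht h.symm)
        simp [PySem.Dict.contains_insert, PySem.Dict.getD_insert, hb, hb', ht]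

-- B's outer index answers exactly A's first-match lookup in mat
theorem buildIdxB_get? (mat : List (Int × List (Int × Int))) (k : Int)
    (ix : PySem.Dict Int (PySem.Dict Int Int)) :
    (mat.foldl (fun ix kv => if ix.contains kv.1 then ix else ix.insert kv.1 (buildInnerB kv.2)) ix).get? k
      = if ix.contains k then ix.get? k
        else (mat.find? (fun kv => kv.1 == k)).map (fun kv => buildInnerB kv.2) := by
  induction mat generalizing ix with
  | nil =>
    simp only [List.foldl_nil, List.find?_nil, Option.map_none]
    by_cases h : ix.contains k
    · simp [h]
    · simp [h, (PySem.Dict.get?_eq_none_iff_contains ix k).mpr (by simp [h])]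
  | cons kv rest ih =>
    simp only [List.foldl_cons, List.find?_cons]
    by_cases hc : ix.contains kv.1
    · simp only [hc, if_true, ih]
      by_cases ht : ix.contains k
      · simp [ht]
      · have : ¬ (kv.1 == k) := by
          intro h
          exact absurd (beq_iff_eq.mp h ▸ hc) (by simp [ht])
        simp [ht, this]
    · simp only [hc, if_false, ih]
      by_cases ht : k = kv.1
      · subst ht
        simp [PySem.Dict.contains_insert, PySem.Dict.get?_insert, hc]
      · have hb : (k == kv.1) = false := beq_eq_false_iff_ne.mpr ht
        have hb' : (kv.1 == k) = false := beq_eq_false_iff_ne.mpr (fun h => ht h.symm)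
        simp [PySem.Dict.contains_insert, PySem.Dict.get?_insert, hb, hb', ht]

theorem idx_get_eq (mat : List (Int × List (Int × Int))) (k : Int) :
    (buildIdxB mat).get? k = (mat.find? (fun kv => kv.1 == k)).map (fun kv => buildInnerB kv.2) := by
  unfold buildIdxB
  rw [buildIdxB_get? mat k PySem.Dict.empty]
  simp [PySem.Dict.contains_empty]

theorem loops_eq (mat : List (Int × List (Int × Int))) (par : List (Int × Int)) (s : Int) :
    outerLoopA mat par s
      = par.foldl (fun total p =>
          match (mat.find? (fun kv => kv.1 == p.1)).map (fun kv => buildInnerB kv.2) with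
          | none => total
          | some d => total + d.getD p.2 0) s := by
  induction par generalizing s with
  | nil => simp [outerLoopA]
  | cons p rest ih =>
    simp only [outerLoopA, List.foldl_cons]
    cases hf : mat.find? (fun kv => kv.1 == p.1) with
    | none => simp only [hf, Option.map_none]; exact ih s
    | some kv =>
      simp only [hf, Option.map_some]
      have hg : (buildInnerB kv.2).getD p.2 0 = innerScanA kv.2 p.2 := by
        unfold buildInnerB
        rw [buildInnerB_getD kv.2 p.2 PySem.Dict.empty]
        simp [PySem.Dict.contains_empty]
      rw [ih, hg]

-- ===== VERDICT (by name: the statement is the Claim_ definition above) =====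
theorem sumaValoresMatriz_spec : Claim_equal_sumaValoresMatriz := by
  intro mat par _
  unfold Spec_sumaValoresMatriz sumaValoresMatriz sumaValoresMatriz_alt
  have hfun : (fun (total : Int) (p : Int × Int) =>
        match (buildIdxB mat).get? p.1 with
        | none => total
        | some d => total + d.getD p.2 0)
      = (fun (total : Int) (p : Int × Int) =>
        match (mat.find? (fun kv => kv.1 == p.1)).map (fun kv => buildInnerB kv.2) with
        | none => total
        | some d => total + d.getD p.2 0) := by
    funext total p
    rw [idx_get_eq]
  simp only [hfun]
  exact loops_eq mat par 0
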